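-- pv_equiv track=rewrite | github.com/gabriel1906/python_bootcamp_06102018 | zjazd_2/funkcje/zadanie_2.py | wiecej_niz
-- ===== SOURCE A (Python) =====
-- def wiecej_niz(napis, prog):
--     liczniki_liter = {}
--     wynik = set()
--
--     for litera in napis:
--         litera = litera.lower()
--         liczniki_liter[litera] = liczniki_liter.get(litera, 0) + 1
--     for key, value in liczniki_liter.items():
--         if value > prog:
--            wynik.add(key)
--     return wynik
-- ===== SOURCE B (Python) =====
-- def wiecej_niz(napis, prog):
--     rest = [c.lower() for c in napis]
--     wynik = set()
--     while rest:
--         c = rest[0]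
--         others = [x for x in rest if x != c]
--         if len(rest) - len(others) > prog:
--             wynik.add(c)
--         rest = others
--     return wynik
-- ===== Notes on version B (the rewrite author's own statement) =====
-- stated objective: alternative
-- what changed: Replaces the one-pass frequency dict plus a second filtering loop by a partition-and-shrink loop: each round takes the first remaining lowered character, removes all its occurrences from the working list, and reads its multiplicity off the length drop, so no counter table or per-element count call exists.
import Mathlib
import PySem

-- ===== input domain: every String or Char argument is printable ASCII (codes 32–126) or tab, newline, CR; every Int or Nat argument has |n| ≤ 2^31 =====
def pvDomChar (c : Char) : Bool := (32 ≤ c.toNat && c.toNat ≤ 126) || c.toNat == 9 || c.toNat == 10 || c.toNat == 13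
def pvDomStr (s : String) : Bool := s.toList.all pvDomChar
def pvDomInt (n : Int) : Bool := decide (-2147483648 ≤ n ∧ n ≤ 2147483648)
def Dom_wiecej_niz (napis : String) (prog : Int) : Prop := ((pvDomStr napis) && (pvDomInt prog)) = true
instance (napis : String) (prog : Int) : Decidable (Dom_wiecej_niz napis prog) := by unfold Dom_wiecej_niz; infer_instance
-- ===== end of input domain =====

-- B replaces A's frequency dict + second filtering loop by a partition-and-shrink loop:
-- each round removes all occurrences of the first remaining lowered character and reads
-- its multiplicity off the length drop (alternative algorithm, not claimed faster).


-- ===== PORT A =====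
-- litera.lower() on a one-character string, as a String key (exact: PySem.Chars.lower per character)
def pvLowerChar (c : Char) : String := String.ofList (PySem.Chars.lower [c])

def wiecej_niz (napis : String) (prog : Int) : List String :=
  let liczniki_liter : PySem.Dict String Int :=
    napis.toList.foldl (fun d c =>
      let litera := pvLowerChar c
      d.insert litera (d.getD litera 0 + 1)) PySem.Dict.empty
  liczniki_liter.items.foldl (fun (wynik : PySem.Set String) kv =>
      if kv.2 > prog then PySem.Set.add wynik kv.1 else wynik) PySem.Set.empty

-- ===== PORT B =====
-- the 'while rest:' loop of Source B: partition the remaining list by its head, read the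
-- multiplicity off the length drop, recurse on the shrunken list
def wnLoop (prog : Int) (rest : List String) (wynik : PySem.Set String) : PySem.Set String :=
  match rest with
  | [] => wynik
  | c :: tail =>
    let others := (c :: tail).filter (fun x => x ≠ c)
    let wynik' := if ((c :: tail).length : Int) - (others.length : Int) > prog
                  then PySem.Set.add wynik c else wynik
    wnLoop prog others wynik'
termination_by rest.length
decreasing_by
  simp only [List.filter_cons]
  simp only [decide_not]
  exact Nat.lt_succ_of_le (le_trans (List.length_filter_le _ _) (le_refl _))

def wiecej_niz_alt (napis : String) (prog : Int) : List String :=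
  wnLoop prog (napis.toList.map pvLowerChar) PySem.Set.empty

-- ===== PRECONDITION & SPEC =====
def Spec_wiecej_niz (napis : String) (prog : Int) (out : List String) : Prop := out = wiecej_niz_alt napis prog
instance (napis : String) (prog : Int) (out : List String) : Decidable (Spec_wiecej_niz napis prog out) := by unfold Spec_wiecej_niz; infer_instance

-- ===== CLAIM (what is proved, stated in full; the proofs are below) =====
def Claim_equal_wiecej_niz : Prop := ∀ (napis : String) (prog : Int), Dom_wiecej_niz napis prog → Spec_wiecej_niz napis prog (wiecej_niz napis prog)

-- ===== LEMMAS AND PROOFS =====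

-- folding "add if the count exceeds prog" over a nodup list, starting from an accumulator
-- disjoint from the list, appends exactly the filtered elements (A's second loop)
theorem pv_foldl_add_filter (prog : Int) (cnt : String → Int) :
    ∀ (s w : List String), s.Nodup → (∀ k ∈ s, k ∉ w) →
    s.foldl (fun (acc : PySem.Set String) k =>
        if cnt k > prog then PySem.Set.add acc k else acc) w
      = w ++ s.filter (fun k => decide (cnt k > prog)) := by
  intro s
  induction s with
  | nil => intro w _ _; simp
  | cons k t ih =>
    intro w hnd hdisj
    have hk : k ∉ w := hdisj k (List.mem_cons_self ..)
    have hnd' := (List.nodup_cons.mp hnd)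
    simp only [List.foldl_cons, List.filter_cons]
    by_cases h : cnt k > prog
    · have hadd : PySem.Set.add w k = w ++ [k] := by
        simp [PySem.Set.add, PySem.Set.contains, hk]
      rw [if_pos h, hadd, ih (w ++ [k]) hnd'.2 ?_]
      · simp [h]
      · intro x hx
        simp only [List.mem_append, List.mem_singleton]
        rintro (hw | rfl)
        · exact hdisj x (List.mem_cons_of_mem _ hx) hw
        · exact hnd'.1 hx
    · rw [if_neg h, ih w hnd'.2 (fun x hx => hdisj x (List.mem_cons_of_mem _ hx))]
      simp [h]

-- first-occurrence dedup in partition form (proof helpers for B's loop shape)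
-- fuel-indexed first-occurrence dedup in partition form (fuel ≥ length)
def pvDDF : Nat → List String → List String
  | _, [] => []
  | 0, _ :: _ => []
  | n+1, c :: t => c :: pvDDF n (t.filter (fun x => x ≠ c))

def pvDD (l : List String) : List String := pvDDF l.length l

theorem pvDDF_congr : ∀ (n m : Nat) (l : List String), l.length ≤ n → l.length ≤ m →
    pvDDF n l = pvDDF m l := by
  intro n
  induction n with
  | zero =>
    intro m l hn _
    have hl : l = [] := List.eq_nil_of_length_eq_zero (Nat.le_zero.mp hn)
    subst hl
    cases m <;> simp [pvDDF]
  | succ n ih =>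
    intro m l hn hm
    match l, m with
    | [], _ => cases m <;> simp [pvDDF]
    | c :: t, m+1 =>
      simp only [pvDDF]
      rw [ih m _ (le_trans (List.length_filter_le _ _) (Nat.lt_succ_iff.mp (Nat.lt_of_lt_of_le (Nat.lt_succ_self _) hn)))
            (le_trans (List.length_filter_le _ _) (Nat.lt_succ_iff.mp (Nat.lt_of_lt_of_le (Nat.lt_succ_self _) hm)))]

theorem pvDD_cons (c : String) (t : List String) :
    pvDD (c :: t) = c :: pvDD (t.filter (fun x => x ≠ c)) := by
  simp only [pvDD, List.length_cons, pvDDF]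
  rw [pvDDF_congr t.length _ _ (List.length_filter_le _ _) (le_refl _)]

theorem pv_mem_pvDD : ∀ (n : Nat) (l : List String), l.length ≤ n →
    ∀ k, k ∈ pvDD l → k ∈ l := by
  intro n
  induction n with
  | zero =>
    intro l hl k hk
    have : l = [] := List.eq_nil_of_length_eq_zero (Nat.le_zero.mp hl)
    subst this; simp [pvDD, pvDDF] at hk
  | succ n ih =>
    intro l hl k hk
    match l with
    | [] => simp [pvDD, pvDDF] at hk
    | c :: t =>
      rw [pvDD_cons] at hk
      rcases List.mem_cons.mp hk with rfl | hk'
      · exact List.mem_cons_self ..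
      · exact List.mem_cons_of_mem _ (List.mem_of_mem_filter
          (ih _ (le_trans (List.length_filter_le _ _) (Nat.succ_le_succ_iff.mp hl)) k hk'))

theorem pv_foldl_add_eq_dd : ∀ (l w : List String),
    l.foldl PySem.Set.add w = w ++ pvDD (l.filter (fun x => x ∉ w)) := by
  intro l
  induction l with
  | nil => intro w; simp [pvDD, pvDDF]
  | cons x t ih =>
    intro w
    simp only [List.foldl_cons, List.filter_cons]
    by_cases hx : x ∈ w
    · have : PySem.Set.add w x = w := by simp [PySem.Set.add, PySem.Set.contains, hx]
      rw [this, ih w]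
      simp [hx]
    · have : PySem.Set.add w x = w ++ [x] := by simp [PySem.Set.add, PySem.Set.contains, hx]
      rw [this, ih (w ++ [x])]
      simp only [hx, not_false_eq_true, decide_true, if_true, List.append_assoc]
      rw [pvDD_cons]
      simp only [List.singleton_append, List.filter_filter]
      congr 2
      refine congrArg pvDD (List.filter_congr ?_)
      intro y _
      by_cases hyx : y = x <;> by_cases hyw : y ∈ w <;> simp [hyx, hyw]

theorem pv_ofList_eq_pvDD (l : List String) : PySem.Set.ofList l = pvDD l := by
  rw [PySem.Set.ofList_eq_foldl, pv_foldl_add_eq_dd]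
  simp

-- count as a length drop of the partition
theorem pv_count_eq_length_sub (c : String) (l : List String) :
    ((l.count c : Int)) = (l.length : Int) - ((l.filter (fun x => x ≠ c)).length : Int) := by
  have h1 : (l.filter (fun x => x ≠ c)).length = l.countP (fun x => decide (x ≠ c)) :=
    List.countP_eq_length_filter.symm
  have h2 := List.length_eq_countP_add_countP (p := fun x => x == c) (l := l)
  have h3 : l.countP (fun x => decide (x ≠ c)) = l.countP (fun x => decide ¬((x == c) = true)) := by
    apply List.countP_congr
    intro x _
    by_cases h : x = c <;> simp [h]
  have h4 : l.count c = l.countP (fun x => x == c) := rfl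
  omega

theorem pv_count_filter_ne (c k : String) (t : List String) (hk : k ≠ c) :
    (t.filter (fun x => x ≠ c)).count k = t.count k :=
  List.count_filter (by simp [hk])

theorem pv_wnLoop_eq_dd (prog : Int) : ∀ (n : Nat) (rest w : List String),
    rest.length ≤ n → (∀ k ∈ rest, k ∉ w) →
    wnLoop prog rest w
      = w ++ (pvDD rest).filter (fun k => decide ((rest.count k : Int) > prog)) := by
  intro n
  induction n with
  | zero =>
    intro rest w hn _
    have : rest = [] := List.eq_nil_of_length_eq_zero (Nat.le_zero.mp hn)
    subst this
    simp [wnLoop, pvDD, pvDDF]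
  | succ n ih =>
    intro rest w hn hdisj
    match rest with
    | [] => simp [wnLoop, pvDD, pvDDF]
    | c :: tail =>
      rw [wnLoop]
      have ho : (c :: tail).filter (fun x => x ≠ c) = tail.filter (fun x => x ≠ c) := by
        simp
      have hcond : ((c :: tail).length : Int) - (((c :: tail).filter (fun x => x ≠ c)).length : Int)
          = (((c :: tail).count c : Int)) := (pv_count_eq_length_sub c (c :: tail)).symm
      have hcond' : ((c :: tail).length : Int) - ((tail.filter (fun x => x ≠ c)).length : Int)
          = (((c :: tail).count c : Int)) := by
        rw [← ho]
        exact hcond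
      have hlen : (tail.filter (fun x => x ≠ c)).length ≤ n :=
        le_trans (List.length_filter_le _ _) (Nat.succ_le_succ_iff.mp hn)
      have hdisj' : ∀ k ∈ tail.filter (fun x => x ≠ c), k ∉ w :=
        fun k hk => hdisj k (List.mem_cons_of_mem _ (List.mem_of_mem_filter hk))
      have hcw : c ∉ w := hdisj c (List.mem_cons_self ..)
      have hfiltcongr : (pvDD (tail.filter (fun x => x ≠ c))).filter
            (fun k => decide (((c :: tail).count k : Int) > prog))
          = (pvDD (tail.filter (fun x => x ≠ c))).filter
            (fun k => decide ((((tail.filter (fun x => x ≠ c)).count k : Int)) > prog)) := by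
        apply List.filter_congr
        intro k hk
        have hkmem : k ∈ tail.filter (fun x => x ≠ c) :=
          pv_mem_pvDD _ _ (le_refl _) k hk
        have hkc : k ≠ c := by
          have := (List.mem_filter.mp hkmem).2
          simpa using this
        rw [List.count_cons_of_ne (Ne.symm hkc), pv_count_filter_ne c k tail hkc]
      rw [pvDD_cons]
      rw [ho, hcond']
      by_cases hc : ((c :: tail).count c : Int) > prog
      · rw [if_pos hc, List.filter_cons_of_pos (by simpa using hc)]
        have hadd : PySem.Set.add w c = w ++ [c] := by
          simp [PySem.Set.add, PySem.Set.contains, hcw]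
        rw [hadd, ih _ _ hlen ?_]
        · rw [hfiltcongr]
          simp [List.append_assoc]
        · intro k hk
          simp only [List.mem_append, List.mem_singleton, not_or]
          refine ⟨hdisj' k hk, ?_⟩
          have := (List.mem_filter.mp hk).2
          simpa using this
      · rw [if_neg hc, List.filter_cons_of_neg (by simpa using hc)]
        rw [ih _ _ hlen hdisj']
        rw [hfiltcongr]

-- ===== VERDICT (by name: the statement is the Claim_ definition above) =====
theorem wiecej_niz_spec : Claim_equal_wiecej_niz := by
  intro napis prog _
  unfold Spec_wiecej_niz wiecej_niz wiecej_niz_alt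
  dsimp only
  rw [show (napis.toList.foldl (fun d c =>
        let litera := pvLowerChar c
        d.insert litera (d.getD litera 0 + 1)) PySem.Dict.empty)
      = PySem.Dict.counter (napis.toList.map pvLowerChar) from by
    rw [← PySem.Dict.foldl_insert_getD_add_one_eq_counter, List.foldl_map]]
  rw [PySem.Dict.items_counter, List.foldl_map]
  rw [pv_foldl_add_filter prog _ _ PySem.Set.empty
    (PySem.Set.nodup_ofList _) (by intro k _ hk; exact (List.not_mem_nil hk))]
  rw [pv_wnLoop_eq_dd prog (napis.toList.map pvLowerChar).length _ PySem.Set.empty (le_refl _)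
        (by intro k _ hk; exact (List.not_mem_nil hk)),
      ← pv_ofList_eq_pvDD]
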